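-- pv_equiv track=rewrite | github.com/matthieudemari/SUTD_ILP_Computing2020 | W4S2 - MT/Grades/functions/1005267/find_if_triplet.py | find_if_triplet
-- ===== SOURCE A (Python) =====
-- def find_if_triplet(my_list):
--     counter = []
--
--     for i in my_list:
--         if i not in counter:
--             counter.append(i)
--     diff_in_value = len(my_list) - len(counter)
--
--     if diff_in_value >= 2:
--         has_triplet = True
--     else:
--         has_triplet = False
--     return has_triplet
-- ===== SOURCE B (Python) =====
-- def find_if_triplet(my_list):
--     dup = 0
--     for i in range(len(my_list)):
--         if my_list[i] in my_list[:i]: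
--             dup += 1
--             if dup >= 2:
--                 return True
--     return False
-- ===== Notes on version B (the rewrite author's own statement) =====
-- stated objective: faster
-- what changed: B drops A's deduplicated-list construction and length subtraction: it counts duplicate positions directly (element found in the prefix before it) and returns True as soon as a second duplicate appears, instead of always scanning the whole list.
import Mathlib
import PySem

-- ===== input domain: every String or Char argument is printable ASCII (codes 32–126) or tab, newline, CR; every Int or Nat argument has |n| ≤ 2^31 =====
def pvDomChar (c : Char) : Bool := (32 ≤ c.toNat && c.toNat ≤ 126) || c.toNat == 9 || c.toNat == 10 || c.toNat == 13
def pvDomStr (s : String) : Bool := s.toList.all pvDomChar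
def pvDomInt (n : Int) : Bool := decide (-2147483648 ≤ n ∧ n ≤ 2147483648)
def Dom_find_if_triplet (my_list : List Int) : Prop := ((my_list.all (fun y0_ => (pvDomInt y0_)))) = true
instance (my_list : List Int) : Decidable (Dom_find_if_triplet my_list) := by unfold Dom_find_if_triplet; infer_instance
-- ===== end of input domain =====

-- B counts duplicate positions directly with an early exit instead of A's dedup-list + length subtraction.

-- ===== PORT A =====
def find_if_triplet (my_list : List Int) : Bool :=
  let counter : List Int :=
    my_list.foldl (fun c i => if c.contains i then c else c ++ [i]) []
  let diff_in_value : Int := (my_list.length : Int) - (counter.length : Int)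
  if diff_in_value ≥ 2 then true else false

-- ===== PORT B =====
-- loop over positions; `seen` is the prefix my_list[:i]; dup counts duplicates; early return at 2
def find_if_triplet_altLoop (xs : List Int) (seen : List Int) (dup : Nat) : Bool :=
  match xs with
  | [] => false
  | x :: rest =>
    if seen.contains x then
      if dup + 1 ≥ 2 then true
      else find_if_triplet_altLoop rest (seen ++ [x]) (dup + 1)
    else find_if_triplet_altLoop rest (seen ++ [x]) dup

def find_if_triplet_alt (my_list : List Int) : Bool :=
  find_if_triplet_altLoop my_list [] 0

-- ===== PRECONDITION & SPEC =====
def Spec_find_if_triplet (my_list : List Int) (out : Bool) : Prop := out = find_if_triplet_alt my_list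
instance (my_list : List Int) (out : Bool) : Decidable (Spec_find_if_triplet my_list out) := by unfold Spec_find_if_triplet; infer_instance

-- ===== CLAIM (what is proved, stated in full; the proofs are below) =====
def Claim_equal_find_if_triplet : Prop := ∀ (my_list : List Int), Dom_find_if_triplet my_list → Spec_find_if_triplet my_list (find_if_triplet my_list)

-- ===== LEMMAS AND PROOFS =====

/-- number of positions whose element already occurs in the accumulated prefix `seen` -/
def pvDups (xs : List Int) (seen : List Int) : Nat :=
  match xs with
  | [] => 0
  | x :: rest => (if seen.contains x then 1 else 0) + pvDups rest (seen ++ [x])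

theorem pvDups_congr (xs : List Int) (s1 s2 : List Int) (h : ∀ a, a ∈ s1 ↔ a ∈ s2) :
    pvDups xs s1 = pvDups xs s2 := by
  induction xs generalizing s1 s2 with
  | nil => rfl
  | cons x rest ih =>
    simp only [pvDups]
    rw [ih (s1 ++ [x]) (s2 ++ [x]) (by intro a; simp [h a])]
    have : s1.contains x = s2.contains x := by simp [List.contains_eq_mem, h x]
    rw [this]

theorem pvFold_length (xs : List Int) (c : List Int) :
    ((xs.foldl (fun c i => if c.contains i then c else c ++ [i]) c).length : Int)
      = c.length + xs.length - pvDups xs c := by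
  induction xs generalizing c with
  | nil => simp [pvDups]
  | cons x rest ih =>
    simp only [List.foldl_cons, pvDups]
    by_cases h : c.contains x
    · rw [if_pos h, if_pos h,
        pvDups_congr rest (c ++ [x]) c
          (by intro a; simp only [List.contains_eq_mem, decide_eq_true_eq] at h; simp only [List.mem_append, List.mem_singleton]; exact ⟨fun ha => ha.elim id (fun hx => hx ▸ h), Or.inl⟩),
        ih c]
      simp only [List.length_cons]
      push_cast; ring
    · rw [if_neg h, if_neg h, ih (c ++ [x])]
      simp only [List.length_append, List.length_cons, List.length_nil]
      push_cast; ring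

theorem pvLoop_eq (xs : List Int) (seen : List Int) (dup : Nat) (hd : dup ≤ 1) :
    find_if_triplet_altLoop xs seen dup = decide (dup + pvDups xs seen ≥ 2) := by
  induction xs generalizing seen dup with
  | nil => simp [find_if_triplet_altLoop, pvDups]; omega
  | cons x rest ih =>
    simp only [find_if_triplet_altLoop, pvDups]
    by_cases h : seen.contains x
    · simp only [h, if_true]
      by_cases h2 : dup + 1 ≥ 2
      · rw [if_pos h2]; symm; rw [decide_eq_true_iff]; omega
      · rw [if_neg h2, ih _ _ (by omega), decide_eq_decide]; omega
    · rw [Bool.not_eq_true] at h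
      simp only [h, Bool.false_eq_true, if_false]
      rw [ih _ _ hd, decide_eq_decide]; omega

-- ===== VERDICT (by name: the statement is the Claim_ definition above) =====
theorem find_if_triplet_spec : Claim_equal_find_if_triplet := by
  intro l _
  unfold Spec_find_if_triplet find_if_triplet find_if_triplet_alt
  rw [pvLoop_eq _ _ _ (by omega)]
  have h := pvFold_length l []
  simp only [List.length_nil, Int.natCast_zero] at h
  by_cases h2 : (0 : Nat) + pvDups l [] ≥ 2
  · rw [if_pos (by omega : ((l.length : Int) - ((l.foldl (fun c i => if c.contains i then c else c ++ [i]) []).length : Int)) ≥ 2)]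
    symm; rw [decide_eq_true_iff]; omega
  · rw [if_neg (by omega : ¬ ((l.length : Int) - ((l.foldl (fun c i => if c.contains i then c else c ++ [i]) []).length : Int)) ≥ 2)]
    symm; rw [decide_eq_false_iff_not]; omega
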